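-- pv_equiv track=rewrite | github.com/eb9862/PS | 프로그래머스/2/340212. ［PCCP 기출문제］ 2번 ／ 퍼즐 게임 챌린지/［PCCP 기출문제］ 2번 ／ 퍼즐 게임 챌린지.py | solution
-- ===== SOURCE A (Python) =====
-- def find_time_to_solve(diffs: list, times: list, limit: int, level: int) -> int:
--     l = len(diffs)
--     t = 0
--     time_prev = 0
--     for i in range(l):
--         time_cur = times[i]
--         diff = diffs[i]
--         if diff <= level:
--             t += time_cur
--         else:
--             total = (time_prev + time_cur) * (diff - level) + time_cur
--             t += total
--         time_prev = time_cur
--     return t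
--
-- def solution(diffs, times, limit):
--     answer = 0
--
--     level = 1
--     level_max = limit // 2
--     while level <= level_max:
--         m = (level + level_max) // 2
--         t = find_time_to_solve(diffs, times, limit, m)
--         if t > limit :
--             level = m + 1
--         else:
--             answer = m
--             level_max = m - 1
--     return answer
-- ===== SOURCE B (Python) =====
-- def _bisect(ds, x, lo, hi):
--     # rightmost insertion point for x in the sorted segment ds[lo:hi]
--     if lo >= hi:
--         return lo
--     mid = (lo + hi) // 2
--     if ds[mid] <= x:
--         return _bisect(ds, x, mid + 1, hi)
--     return _bisect(ds, x, lo, mid)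
--
--
-- def solution(diffs, times, limit):
--     # Precompute: pairs (diff, prev+cur) sorted by diff, their prefix sums of w
--     # and w*diff, so each binary-search probe costs O(log n) instead of O(n).
--     pairs = []
--     base = 0
--     prev = 0
--     for d, c in zip(diffs, times):
--         pairs.append((d, prev + c))
--         base += c
--         prev = c
--     pairs = sorted(pairs, key=lambda p: p[0])
--     ds = [p[0] for p in pairs]
--     sw = [0]
--     swd = [0]
--     aw = 0
--     awd = 0
--     for d, w in pairs:
--         aw += w
--         awd += w * d
--         sw.append(aw)
--         swd.append(awd)
--     n = len(pairs)
--     answer = 0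
--     level = 1
--     level_max = limit // 2
--     while level <= level_max:
--         m = (level + level_max) // 2
--         j = _bisect(ds, m, 0, n)
--         t = base + (awd - swd[j]) - m * (aw - sw[j])
--         if t > limit:
--             level = m + 1
--         else:
--             answer = m
--             level_max = m - 1
--     return answer
-- ===== Notes on version B (the rewrite author's own statement) =====
-- stated objective: faster
-- what changed: A recomputes the total solve time with an O(n) scan at every binary-search probe; B precomputes the (diff, prev+cur) pairs sorted by diff with prefix sums of w and w*diff once, so each probe is a single O(log n) bisect plus constant arithmetic.
import Mathlib
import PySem

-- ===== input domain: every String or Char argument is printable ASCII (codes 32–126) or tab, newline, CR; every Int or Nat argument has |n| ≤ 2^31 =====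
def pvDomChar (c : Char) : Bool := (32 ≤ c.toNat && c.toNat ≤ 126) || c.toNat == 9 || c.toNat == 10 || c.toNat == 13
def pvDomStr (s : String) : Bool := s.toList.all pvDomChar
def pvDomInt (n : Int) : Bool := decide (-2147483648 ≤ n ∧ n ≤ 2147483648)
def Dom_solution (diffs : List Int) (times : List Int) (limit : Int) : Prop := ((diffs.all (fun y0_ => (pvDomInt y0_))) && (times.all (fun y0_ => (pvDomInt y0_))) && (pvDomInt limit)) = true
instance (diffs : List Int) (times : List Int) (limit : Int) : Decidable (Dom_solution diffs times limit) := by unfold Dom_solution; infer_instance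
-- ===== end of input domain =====

-- B replaces A's O(n) per-probe time computation by a one-off sort with prefix
-- sums plus an O(log n) binary search per probe (objective: faster, asymptotic).

-- ===== PORT A =====
-- find_time_to_solve: the indexed for-loop, state (t, time_prev)
def findTime (diffs times : List Int) (limit level : Int) : Int :=
  let l := PySem.List.len diffs
  ((PySem.List.pyRange 0 l 1).foldl (fun (st : Int × Int) i =>
      let time_cur := PySem.List.pyGetD times i 0
      let diff := PySem.List.pyGetD diffs i 0
      let t := if diff ≤ level then st.1 + time_cur
               else st.1 + ((st.2 + time_cur) * (diff - level) + time_cur)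
      (t, time_cur)) (0, 0)).1

-- the while-loop of A; fuel only makes the loop structurally recursive, it is
-- always called with enough fuel ((level_max - level + 1).toNat + 1 suffices)
def solGo (diffs times : List Int) (limit : Int) : Nat → Int → Int → Int → Int
  | 0, answer, _, _ => answer
  | fuel + 1, answer, level, level_max =>
    if level ≤ level_max then
      let m := PySem.Int.floordiv (level + level_max) 2
      let t := findTime diffs times limit m
      if t > limit then solGo diffs times limit fuel answer (m + 1) level_max
      else solGo diffs times limit fuel m level (m - 1)
    else answer

def solution (diffs : List Int) (times : List Int) (limit : Int) : Int :=
  solGo diffs times limit ((PySem.Int.floordiv limit 2).toNat + 1) 0 1 (PySem.Int.floordiv limit 2)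

-- ===== PORT B =====
-- _bisect: recursive rightmost insertion point; fuel-totalised ((hi-lo).toNat+1 suffices)
def bisectGo (ds : List Int) (x : Int) : Nat → Int → Int → Int
  | 0, lo, _ => lo
  | fuel + 1, lo, hi =>
    if lo ≥ hi then lo
    else
      let mid := PySem.Int.floordiv (lo + hi) 2
      if PySem.List.pyGetD ds mid 0 ≤ x then bisectGo ds x fuel (mid + 1) hi
      else bisectGo ds x fuel lo mid

-- the while-loop of B, probing via bisect + prefix sums
def altGo (ds sw swd : List Int) (base aw awd n limit : Int) :
    Nat → Int → Int → Int → Int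
  | 0, answer, _, _ => answer
  | fuel + 1, answer, level, level_max =>
    if level ≤ level_max then
      let m := PySem.Int.floordiv (level + level_max) 2
      let j := bisectGo ds m ((n - 0).toNat + 1) 0 n
      let t := base + (awd - PySem.List.pyGetD swd j 0) - m * (aw - PySem.List.pyGetD sw j 0)
      if t > limit then altGo ds sw swd base aw awd n limit fuel answer (m + 1) level_max
      else altGo ds sw swd base aw awd n limit fuel m level (m - 1)
    else answer

def solution_alt (diffs : List Int) (times : List Int) (limit : Int) : Int :=
  let st := (diffs.zip times).foldl
      (fun (st : List (Int × Int) × Int × Int) dc =>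
        (st.1 ++ [(dc.1, st.2.2 + dc.2)], st.2.1 + dc.2, dc.2)) ([], 0, 0)
  let pairs := PySem.List.sorted st.1 (fun p => p.1) false
  let ds := pairs.map (fun p => p.1)
  let pf := pairs.foldl
      (fun (st : List Int × List Int × Int × Int) p =>
        (st.1 ++ [st.2.2.1 + p.2], st.2.1 ++ [st.2.2.2 + p.2 * p.1],
         st.2.2.1 + p.2, st.2.2.2 + p.2 * p.1)) ([0], [0], 0, 0)
  let n := PySem.List.len pairs
  altGo ds pf.1 pf.2.1 st.2.1 pf.2.2.1 pf.2.2.2 n limit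
    ((PySem.Int.floordiv limit 2).toNat + 1) 0 1 (PySem.Int.floordiv limit 2)

-- ===== PRECONDITION & SPEC =====
-- Pre_ excludes exactly the inputs on which A raises IndexError: times shorter
-- than diffs while the search loop runs at all (limit ≥ 2).
def Pre_solution (diffs : List Int) (times : List Int) (limit : Int) : Prop :=
  limit ≤ 1 ∨ diffs.length ≤ times.length
instance (diffs : List Int) (times : List Int) (limit : Int) : Decidable (Pre_solution diffs times limit) := by unfold Pre_solution; infer_instance
def pvWitness_solution : List Int × List Int × Int := ([1, 2], [3, 4], 10)

def Spec_solution (diffs : List Int) (times : List Int) (limit : Int) (out : Int) : Prop := out = solution_alt diffs times limit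
instance (diffs : List Int) (times : List Int) (limit : Int) (out : Int) : Decidable (Spec_solution diffs times limit out) := by unfold Spec_solution; infer_instance

-- ===== CLAIM (what is proved, stated in full; the proofs are below) =====
def Claim_equal_solution : Prop := ∀ (diffs : List Int) (times : List Int) (limit : Int), Dom_solution diffs times limit → Pre_solution diffs times limit → Spec_solution diffs times limit (solution diffs times limit)
-- ===== LEMMAS AND PROOFS =====

def wpairs : List (Int × Int) → Int → List (Int × Int)
  | [], _ => []
  | p :: r, prev => (p.1, prev + p.2) :: wpairs r p.2
def scanAdd (f : Int × Int → Int) : List (Int × Int) → Int → List Int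
  | [], _ => []
  | p :: r, a => (a + f p) :: scanAdd f r (a + f p)

theorem idx_fold_eq_zip (F : Int × Int → Int → Int → Int × Int) :
    ∀ (diffs times : List Int) (st : Int × Int), diffs.length ≤ times.length →
      (List.range diffs.length).foldl (fun st k => F st (diffs.getD k 0) (times.getD k 0)) st
        = (diffs.zip times).foldl (fun st p => F st p.1 p.2) st := by
  intro diffs
  induction diffs with
  | nil => intro times st h; simp
  | cons d ds ih =>
    intro times st h
    cases times with
    | nil => simp at h
    | cons t ts =>
      simp only [List.length_cons, List.range_succ_eq_map, List.foldl_cons, List.foldl_map,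
        List.getD_cons_zero, List.getD_cons_succ, List.zip_cons_cons]
      exact ih ts _ (by simpa using h)

theorem a_fold_closed (m : Int) :
    ∀ (L : List (Int × Int)) (prev t0 : Int),
      (L.foldl (fun (st : Int × Int) p =>
          (if p.1 ≤ m then st.1 + p.2 else st.1 + ((st.2 + p.2) * (p.1 - m) + p.2), p.2))
        (t0, prev)).1
      = t0 + (L.map Prod.snd).sum
          + ((wpairs L prev).map (fun q => if q.1 ≤ m then 0 else q.2 * (q.1 - m))).sum := by
  intro L
  induction L with
  | nil => intro prev t0; simp [wpairs]
  | cons p r ih =>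
    intro prev t0
    simp only [List.foldl_cons, wpairs, List.map_cons, List.sum_cons]
    rw [ih]
    split_ifs <;> ring

theorem build_fold :
    ∀ (L : List (Int × Int)) (acc : List (Int × Int)) (b p : Int),
      L.foldl (fun (st : List (Int × Int) × Int × Int) dc =>
          (st.1 ++ [(dc.1, st.2.2 + dc.2)], st.2.1 + dc.2, dc.2)) (acc, b, p)
        = (acc ++ wpairs L p, b + (L.map Prod.snd).sum, L.foldl (fun _ q => q.2) p) := by
  intro L
  induction L with
  | nil => intro acc b p; simp [wpairs]
  | cons q r ih =>
    intro acc b p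
    simp only [List.foldl_cons, wpairs, List.map_cons, List.sum_cons]
    rw [ih]
    simp [add_assoc]

theorem pref_fold :
    ∀ (P : List (Int × Int)) (L1 L2 : List Int) (a b : Int),
      P.foldl (fun (st : List Int × List Int × Int × Int) p =>
          (st.1 ++ [st.2.2.1 + p.2], st.2.1 ++ [st.2.2.2 + p.2 * p.1],
           st.2.2.1 + p.2, st.2.2.2 + p.2 * p.1)) (L1, L2, a, b)
        = (L1 ++ scanAdd (fun p => p.2) P a, L2 ++ scanAdd (fun p => p.2 * p.1) P b,
           a + (P.map (fun p => p.2)).sum, b + (P.map (fun p => p.2 * p.1)).sum) := by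
  intro P
  induction P with
  | nil => intro L1 L2 a b; simp [scanAdd]
  | cons q r ih =>
    intro L1 L2 a b
    simp only [List.foldl_cons, scanAdd, List.map_cons, List.sum_cons]
    rw [ih]
    simp [add_assoc]

theorem scanAdd_getD (f : Int × Int → Int) :
    ∀ (P : List (Int × Int)) (a : Int) (j : Nat), j ≤ P.length →
      (a :: scanAdd f P a).getD j 0 = a + ((P.take j).map f).sum := by
  intro P
  induction P with
  | nil => intro a j h; simp at h; subst h; simp
  | cons q r ih =>
    intro a j h
    cases j with
    | zero => simp
    | succ j =>
      simp only [scanAdd, List.getD_cons_succ, List.take_succ_cons, List.map_cons, List.sum_cons]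
      rw [ih _ j (by simpa using h)]
      ring

theorem pairwise_getD_mono (ds : List Int) (hs : ds.Pairwise (· ≤ ·))
    (k l : Nat) (hkl : k ≤ l) (hl : l < ds.length) : ds.getD k 0 ≤ ds.getD l 0 := by
  rw [List.getD_eq_getElem ds 0 (lt_of_le_of_lt hkl hl), List.getD_eq_getElem ds 0 hl]
  rcases eq_or_lt_of_le hkl with h | h
  · subst h; rfl
  · exact List.pairwise_iff_getElem.mp hs k l _ _ h

theorem bisect_post (ds : List Int) (x : Int) (hs : ds.Pairwise (· ≤ ·)) :
    ∀ (fuel : Nat) (lo hi : Int), (hi - lo).toNat < fuel →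
      0 ≤ lo → lo ≤ hi → hi ≤ ds.length →
      lo ≤ bisectGo ds x fuel lo hi ∧ bisectGo ds x fuel lo hi ≤ hi ∧
      (∀ k : Nat, lo.toNat ≤ k → k < (bisectGo ds x fuel lo hi).toNat → ds.getD k 0 ≤ x) ∧
      (∀ k : Nat, (bisectGo ds x fuel lo hi).toNat ≤ k → k < hi.toNat → x < ds.getD k 0) := by
  intro fuel
  induction fuel with
  | zero => intro lo hi hf; omega
  | succ fuel ih =>
    intro lo hi hf h0 hlh hhl
    by_cases hge : lo ≥ hi
    · have : lo = hi := le_antisymm hlh hge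
      simp only [bisectGo, if_pos hge]
      refine ⟨le_refl _, le_of_eq this, ?_, ?_⟩ <;> intro k h1 h2 <;> omega
    · have hlt : lo < hi := lt_of_not_ge hge
      have hmid := PySem.Int.floordiv_two_mid_bounds (lo := lo) (hi := hi) hlh
      have hmlt : PySem.Int.floordiv (lo + hi) 2 < hi := by
        rw [PySem.Int.floordiv_lt_iff_lt_mul (by omega)]; omega
      have hmval : PySem.List.pyGetD ds (PySem.Int.floordiv (lo + hi) 2) 0
          = ds.getD (PySem.Int.floordiv (lo + hi) 2).toNat 0 := by
        rw [PySem.List.pyGetD_eq_getElem ds 0 (by omega) (by omega),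
          List.getD_eq_getElem ds 0 (by omega)]
      by_cases hc : PySem.List.pyGetD ds (PySem.Int.floordiv (lo + hi) 2) 0 ≤ x
      · simp only [bisectGo, if_neg hge, if_pos hc]
        obtain ⟨j1, j2, j3, j4⟩ := ih (PySem.Int.floordiv (lo + hi) 2 + 1) hi (by omega) (by omega) (by omega) hhl
        refine ⟨by omega, j2, ?_, j4⟩
        intro k hk1 hk2
        by_cases hkm : k ≤ (PySem.Int.floordiv (lo + hi) 2).toNat
        · calc ds.getD k 0 ≤ ds.getD (PySem.Int.floordiv (lo + hi) 2).toNat 0 :=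
                pairwise_getD_mono ds hs _ _ hkm (by omega)
            _ ≤ x := by rw [← hmval]; exact hc
        · exact j3 k (by omega) hk2
      · simp only [bisectGo, if_neg hge, if_neg hc]
        obtain ⟨j1, j2, j3, j4⟩ := ih lo (PySem.Int.floordiv (lo + hi) 2) (by omega) h0 (by omega) (by omega)
        refine ⟨j1, by omega, j3, ?_⟩
        intro k hk1 hk2
        by_cases hkm : (PySem.Int.floordiv (lo + hi) 2).toNat ≤ k
        · calc x < ds.getD (PySem.Int.floordiv (lo + hi) 2).toNat 0 := by
                rw [← hmval]; exact lt_of_not_ge hc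
            _ ≤ ds.getD k 0 := pairwise_getD_mono ds hs _ _ hkm (by omega)
        · exact j4 k hk1 (by omega)


theorem scanAdd_length (f : Int × Int → Int) :
    ∀ (P : List (Int × Int)) (a : Int), (scanAdd f P a).length = P.length := by
  intro P
  induction P with
  | nil => intro a; rfl
  | cons q r ih => intro a; simp [scanAdd, ih]

theorem sum_sub_mul (m : Int) (P : List (Int × Int)) :
    (P.map (fun q => q.2 * q.1 - m * q.2)).sum
      = (P.map (fun q => q.2 * q.1)).sum - m * (P.map (fun q => q.2)).sum := by
  induction P with
  | nil => simp
  | cons q r ih => simp only [List.map_cons, List.sum_cons, ih]; ring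

theorem probe_eq (diffs times : List Int) (limit : Int)
    (h : diffs.length ≤ times.length) (m : Int) :
    (let st := (diffs.zip times).foldl
        (fun (st : List (Int × Int) × Int × Int) dc =>
          (st.1 ++ [(dc.1, st.2.2 + dc.2)], st.2.1 + dc.2, dc.2)) ([], 0, 0)
     let pairs := PySem.List.sorted st.1 (fun p => p.1) false
     let ds := pairs.map (fun p => p.1)
     let pf := pairs.foldl
        (fun (st : List Int × List Int × Int × Int) p =>
          (st.1 ++ [st.2.2.1 + p.2], st.2.1 ++ [st.2.2.2 + p.2 * p.1],
           st.2.2.1 + p.2, st.2.2.2 + p.2 * p.1)) ([0], [0], 0, 0)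
     let n := PySem.List.len pairs
     let j := bisectGo ds m ((n - 0).toNat + 1) 0 n
     st.2.1 + (pf.2.2.2 - PySem.List.pyGetD pf.2.1 j 0) - m * (pf.2.2.1 - PySem.List.pyGetD pf.1 j 0))
    = findTime diffs times limit m := by
  -- right side: findTime as a closed-form sum over wpairs
  have hR : findTime diffs times limit m
      = (( diffs.zip times).map Prod.snd).sum
        + ((wpairs (diffs.zip times) 0).map
            (fun q => if q.1 ≤ m then 0 else q.2 * (q.1 - m))).sum := by
    show (((PySem.List.pyRange 0 (PySem.List.len diffs) 1).foldl _ (0, 0)).1 : Int) = _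
    rw [PySem.List.len_eq, PySem.List.pyRange_one]
    have : ((diffs.length : Int) - 0).toNat = diffs.length := by omega
    rw [this, List.foldl_map]
    simp only [zero_add, PySem.List.pyGetD_natCast]
    rw [idx_fold_eq_zip (fun st d c =>
      (if d ≤ m then st.1 + c else st.1 + ((st.2 + c) * (d - m) + c), c)) diffs times (0,0) h]
    rw [a_fold_closed m (diffs.zip times) 0 0]
    ring
  dsimp only
  rw [build_fold]
  dsimp only
  rw [pref_fold]
  dsimp only
  rw [hR]
  simp only [List.nil_append, zero_add]
  set L := diffs.zip times with hL
  set P := PySem.List.sorted (wpairs L 0) (fun p => p.1) false with hP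
  set ds := P.map (fun p => p.1) with hds
  have hperm := PySem.List.sorted_perm (wpairs L 0) (fun p => p.1) false
  have hSf : ∀ g : Int × Int → Int, (P.map g).sum = ((wpairs L 0).map g).sum :=
    fun g => ((hperm.map g).sum_eq)
  have hpw : ds.Pairwise (· ≤ ·) := by
    rw [hds, hP]; exact PySem.List.sorted_map_key_pairwise _ _
  have hlen : ds.length = P.length := by rw [hds]; exact List.length_map ..
  have hn : PySem.List.len P = (P.length : Int) := PySem.List.len_eq _
  obtain ⟨hj0, hjn, hlo, hhi⟩ := bisect_post ds m hpw ((PySem.List.len P - 0).toNat + 1) 0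
      (PySem.List.len P) (by omega) le_rfl (by rw [hn]; exact_mod_cast Nat.zero_le _)
      (by rw [hn, hlen])
  set j := bisectGo ds m ((PySem.List.len P - 0).toNat + 1) 0 (PySem.List.len P) with hj
  have hjnat : j.toNat ≤ P.length := by rw [hn] at hjn; omega
  have hdsk : ∀ k, (hk : k < P.length) → ds.getD k 0 = (P[k]).1 := by
    intro k hk
    rw [List.getD_eq_getElem ds 0 (by omega)]
    simp [hds]
  have hget : ∀ f : Int × Int → Int,
      PySem.List.pyGetD ([0] ++ scanAdd f P 0) j 0 = ((P.take j.toNat).map f).sum := by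
    intro f
    rw [List.singleton_append,
      PySem.List.pyGetD_eq_getElem _ 0 hj0 (by simp [scanAdd_length]; omega),
      ← List.getD_eq_getElem _ 0 (by simp [scanAdd_length]; omega),
      scanAdd_getD f P 0 j.toNat hjnat, zero_add]
  have hsplit : ∀ g : Int × Int → Int,
      (P.map g).sum = ((P.take j.toNat).map g).sum + ((P.drop j.toNat).map g).sum := by
    intro g
    have := congrArg (fun l => (List.map g l).sum) (List.take_append_drop j.toNat P)
    simpa [List.map_append, List.sum_append] using this.symm
  have htake0 : ((P.take j.toNat).map (fun q => if q.1 ≤ m then 0 else q.2 * (q.1 - m))).sum = 0 := by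
    apply List.sum_eq_zero
    intro x hx
    obtain ⟨q, hq, rfl⟩ := List.mem_map.mp hx
    obtain ⟨i, hi, rfl⟩ := List.mem_iff_getElem.mp hq
    have h2 : (i : Int) < j ∧ i < P.length := by simpa using hi
    have hi' : i < j.toNat := by omega
    have hi2 : i < P.length := h2.2
    rw [List.getElem_take]
    rw [if_pos]
    have := hlo i (by omega) (by omega)
    rwa [hdsk i hi2] at this
  have hdrop : ((P.drop j.toNat).map (fun q => if q.1 ≤ m then 0 else q.2 * (q.1 - m))).sum
      = ((P.drop j.toNat).map (fun q => q.2 * q.1 - m * q.2)).sum := by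
    rw [List.map_congr_left]
    intro q hq
    obtain ⟨i, hi, rfl⟩ := List.mem_iff_getElem.mp hq
    have hi' : j.toNat + i < P.length := by simp at hi; omega
    rw [List.getElem_drop]
    have hm : m < (P[j.toNat + i]).1 := by
      have := hhi (j.toNat + i) (by omega) (by rw [hn]; simpa using hi')
      rwa [hdsk _ hi'] at this
    rw [if_neg (by omega)]
    ring
  rw [hget, hget, hsplit (fun p => p.2 * p.1), hsplit (fun p => p.2),
    ← hSf (fun q => if q.1 ≤ m then 0 else q.2 * (q.1 - m)),
    hsplit (fun q => if q.1 ≤ m then 0 else q.2 * (q.1 - m)), htake0, hdrop,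
    sum_sub_mul m (P.drop j.toNat)]
  ring


theorem loops_eq (diffs times : List Int) (limit : Int)
    (ds sw swd : List Int) (base aw awd n : Int)
    (hp : ∀ m : Int,
      (base + (awd - PySem.List.pyGetD swd (bisectGo ds m ((n - 0).toNat + 1) 0 n) 0)
        - m * (aw - PySem.List.pyGetD sw (bisectGo ds m ((n - 0).toNat + 1) 0 n) 0))
      = findTime diffs times limit m) :
    ∀ (fuel : Nat) (answer level level_max : Int),
      solGo diffs times limit fuel answer level level_max
        = altGo ds sw swd base aw awd n limit fuel answer level level_max := by
  intro fuel
  induction fuel with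
  | zero => intro answer level level_max; rfl
  | succ fuel ih =>
    intro answer level level_max
    simp only [solGo, altGo, hp]
    split_ifs <;> first | rfl | apply ih


-- ===== VERDICT (by name: the statement is the Claim_ definition above) =====
theorem solution_spec : Claim_equal_solution := by
  intro diffs times limit _ hpre
  unfold Spec_solution solution solution_alt
  rcases hpre with hlim | hlen
  · have h1 : PySem.Int.floordiv limit 2 < 1 := by
      rw [PySem.Int.floordiv_lt_iff_lt_mul (by omega)]; omega
    simp only [solGo, altGo, if_neg (by omega : ¬ (1 : Int) ≤ PySem.Int.floordiv limit 2)]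
  · exact loops_eq diffs times limit _ _ _ _ _ _ _
      (fun m => probe_eq diffs times limit hlen m) _ 0 1 (PySem.Int.floordiv limit 2)
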